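-- pv_equiv track=rewrite | github.com/coder-weiru/CodeSignal | src/main/arcade/thecore/_09wellofintegration/SwitchLights.py | solution
-- ===== SOURCE A (Python) =====
-- def solution(a):
--     for i, v in enumerate(a):
--         if v == 1:
--             for j in range(0, i + 1):
--                 if a[j] == 1:
--                     a[j] = 0
--                 else:
--                     a[j] = 1
--     return a
-- ===== SOURCE B (Python) =====
-- def solution(a):
--     # Single right-to-left pass; returns a new list (A mutates its argument in place,
--     # equivalence is about the return value only).
--     p = 0
--     seen = False
--     out = [0] * len(a)
--     for j in range(len(a) - 1, -1, -1):
--         if a[j] == 1: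
--             p = 1 - p
--             seen = True
--             out[j] = 1 - p
--         else:
--             out[j] = p if seen else a[j]
--     return out
-- ===== Notes on version B (the rewrite author's own statement) =====
-- stated objective: alternative
-- what changed: Replaced the nested prefix-toggling loops (for each 1 found, re-toggle the whole prefix) by a single right-to-left pass that sets each position from the parity of ones in its suffix.
import Mathlib
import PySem

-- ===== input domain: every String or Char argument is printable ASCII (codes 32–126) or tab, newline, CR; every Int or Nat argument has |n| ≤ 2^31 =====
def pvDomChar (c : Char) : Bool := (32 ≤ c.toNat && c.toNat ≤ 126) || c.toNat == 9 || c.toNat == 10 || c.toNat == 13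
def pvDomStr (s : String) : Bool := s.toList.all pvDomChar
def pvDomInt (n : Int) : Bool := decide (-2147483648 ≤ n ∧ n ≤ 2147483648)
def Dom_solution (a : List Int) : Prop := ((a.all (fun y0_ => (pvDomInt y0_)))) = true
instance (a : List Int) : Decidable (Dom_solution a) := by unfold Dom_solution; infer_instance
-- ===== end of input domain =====

-- B replaces A's nested prefix-toggling loops by a single right-to-left pass (parity of ones in
-- the suffix); A mutates its argument in place, B does not — the claim is about the return value.

-- ===== PORT A =====
def solution (a : List Int) : List Int :=
  (PySem.List.pyRange 0 (a.length : Int) 1).foldl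
    (fun s i =>
      if PySem.List.pyGetD s i 0 = 1 then
        (PySem.List.pyRange 0 (i + 1) 1).foldl
          (fun t j =>
            if PySem.List.pyGetD t j 0 = 1 then PySem.List.pySetD t j 0
            else PySem.List.pySetD t j 1) s
      else s) a

-- ===== PORT B =====
def solution_alt (a : List Int) : List Int :=
  (a.foldr
    (fun x (st : Int × Bool × List Int) =>
      if x = 1 then
        let p' := 1 - st.1
        (p', true, (1 - p') :: st.2.2)
      else
        (st.1, st.2.1, (if st.2.1 then st.1 else x) :: st.2.2))
    ((0 : Int), false, ([] : List Int))).2.2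

-- ===== PRECONDITION & SPEC =====
def Spec_solution (a : List Int) (out : List Int) : Prop := out = solution_alt a
instance (a : List Int) (out : List Int) : Decidable (Spec_solution a out) := by unfold Spec_solution; infer_instance

-- ===== CLAIM (what is proved, stated in full; the proofs are below) =====
def Claim_equal_solution : Prop := ∀ (a : List Int), Dom_solution a → Spec_solution a (solution a)

-- ===== LEMMAS AND PROOFS =====

-- toggle of one cell, its t-fold iterate, toggle of the first m cells
def tog (x : Int) : Int := if x = 1 then 0 else 1
def togN (t : Nat) (x : Int) : Int := tog^[t] x
def togPre (m : Nat) (s : List Int) : List Int := (s.take m).map tog ++ s.drop m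
-- A's state after processing outer indices 0..k-1: each cell toggled once per 1 in a[j..k)
def Fk (k : Nat) (a : List Int) : List Int :=
  a.mapIdx (fun j x => togN (((a.take k).drop j).count 1) x)
-- the common value of both programs, recursively
def specF : List Int → List Int
  | [] => []
  | x :: l => (if x ≠ 1 ∧ l.count 1 = 0 then x else ((l.count 1 % 2 : Nat) : Int)) :: specF l

theorem togN01 (t : Nat) : togN t 0 = ((t % 2 : Nat) : Int) ∧ togN t 1 = (((t+1) % 2 : Nat) : Int) := by
  induction t with
  | zero => simp [togN]
  | succ t ih =>
    obtain ⟨h0, h1⟩ := ih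
    constructor
    · have : togN (t+1) 0 = togN t 1 := by
        simp [togN, Function.iterate_succ_apply, tog]
      rw [this, h1]
    · have : togN (t+1) 1 = togN t 0 := by
        simp [togN, Function.iterate_succ_apply, tog]
      rw [this, h0]; congr 1; omega

theorem togN_ne_one (x : Int) (hx : x ≠ 1) (t : Nat) : togN (t+1) x = (((t+1) % 2 : Nat) : Int) := by
  have : togN (t+1) x = togN t 1 := by
    simp [togN, Function.iterate_succ_apply, tog, hx]
  rw [this, (togN01 t).2]

theorem specF_head (x : Int) (l : List Int) :
    togN ((x :: l).count 1) x = if x ≠ 1 ∧ l.count 1 = 0 then x else ((l.count 1 % 2 : Nat) : Int) := by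
  by_cases hx : x = 1
  · subst hx
    rw [List.count_cons_self, (togN01 _).2]
    simp; omega
  · rw [List.count_cons_of_ne (by simpa using hx)]
    rcases Nat.eq_zero_or_pos (l.count 1) with h | h
    · simp [h, hx, togN]
    · obtain ⟨t, ht⟩ := Nat.exists_eq_succ_of_ne_zero h.ne'
      rw [ht, togN_ne_one x hx]
      simp [hx]

theorem bfold (l : List Int) :
    l.foldr
      (fun x (st : Int × Bool × List Int) =>
        if x = 1 then
          let p' := 1 - st.1
          (p', true, (1 - p') :: st.2.2)
        else
          (st.1, st.2.1, (if st.2.1 then st.1 else x) :: st.2.2))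
      ((0 : Int), false, ([] : List Int))
    = (((l.count 1 % 2 : Nat) : Int), decide (l.count 1 ≠ 0), specF l) := by
  induction l with
  | nil => simp [specF]
  | cons x l ih =>
    rw [List.foldr_cons, ih]
    by_cases hx : x = 1
    · subst hx
      simp only [if_pos rfl, specF, List.count_cons_self]
      refine Prod.ext ?_ (Prod.ext ?_ ?_) <;> simp <;> push_cast <;> omega
    · simp only [if_neg hx, specF, List.count_cons_of_ne (by simpa using hx)]
      rcases Nat.eq_zero_or_pos (l.count 1) with h | h
      · simp [h, hx]
      · simp [h.ne', hx]

theorem alt_eq_specF (a : List Int) : solution_alt a = specF a := by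
  rw [solution_alt, bfold]

theorem specF_eq_drop (a : List Int) :
    specF a = a.mapIdx (fun j x => togN ((a.drop j).count 1) x) := by
  induction a with
  | nil => simp [specF]
  | cons x l ih =>
    rw [specF, List.mapIdx_cons, ← specF_head]
    simp only [List.drop_zero, List.drop_succ_cons]
    rw [ih]

theorem specF_eq_Fn (a : List Int) : specF a = Fk a.length a := by
  rw [Fk, List.take_length, specF_eq_drop]

theorem togPre_succ (m : Nat) (s : List Int) (h : m < s.length) :
    togPre (m+1) s = (togPre m s).set m (tog s[m]) := by
  unfold togPre
  rw [List.take_add_one, List.getElem?_eq_getElem h]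
  rw [List.drop_eq_getElem_cons h]
  simp only [Option.toList_some, List.map_append, List.map_singleton, List.append_assoc,
    List.singleton_append]
  rw [List.set_append_right _ _ (by simp)]
  simp only [List.length_map, List.length_take, Nat.min_eq_left h.le, Nat.sub_self]
  rw [List.set_cons_zero]

theorem getD_togPre_self (m : Nat) (s : List Int) (h : m < s.length) :
    (togPre m s).getD m 0 = s[m] := by
  unfold togPre
  rw [List.getD_eq_getElem?_getD, List.getElem?_append_right (by simp [Nat.min_eq_left h.le])]
  simp [Nat.min_eq_left h.le, List.getElem?_drop, List.getElem?_eq_getElem h]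

theorem inner_eq_togPre (m : Nat) (s : List Int) (hm : m ≤ s.length) :
    (PySem.List.pyRange 0 (m : Int) 1).foldl
      (fun t j =>
        if PySem.List.pyGetD t j 0 = 1 then PySem.List.pySetD t j 0
        else PySem.List.pySetD t j 1) s = togPre m s := by
  induction m with
  | zero => simp [PySem.List.pyRange_one_eq_nil, togPre]
  | succ m ih =>
    have hstep : ((m+1 : Nat) : Int) = (m : Int) + 1 := by push_cast; ring
    rw [hstep, PySem.List.pyRange_one_succ_right (by positivity), List.foldl_append,
      ih (Nat.le_of_succ_le hm)]
    have hlt : m < s.length := hm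
    simp only [List.foldl_cons, List.foldl_nil]
    rw [PySem.List.pyGetD_natCast, getD_togPre_self m s hlt]
    by_cases h1 : s[m] = 1
    · have ht : tog s[m] = 0 := by simp [tog, h1]
      rw [if_pos h1, PySem.List.pySetD_natCast, show (0:Int) = tog s[m] from ht.symm,
        ← togPre_succ m s hlt]
    · have ht : tog s[m] = 1 := by simp [tog, h1]
      rw [if_neg h1, PySem.List.pySetD_natCast, show (1:Int) = tog s[m] from ht.symm,
        ← togPre_succ m s hlt]

theorem length_Fk (k : Nat) (a : List Int) : (Fk k a).length = a.length := by
  simp [Fk]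

theorem Fk_zero (a : List Int) : Fk 0 a = a := by
  unfold Fk togN
  apply List.ext_getElem <;> simp

theorem getElem_Fk (k : Nat) (a : List Int) (j : Nat) (hj : j < a.length) :
    (Fk k a)[j]'(by rw [length_Fk]; exact hj) = togN (((a.take k).drop j).count 1) a[j] := by
  simp [Fk]

theorem getD_Fk_self (k : Nat) (a : List Int) (hk : k < a.length) :
    (Fk k a).getD k 0 = a[k] := by
  rw [List.getD_eq_getElem?_getD, List.getElem?_eq_getElem (by rw [length_Fk]; exact hk)]
  rw [Option.getD_some, getElem_Fk k a k hk]
  rw [List.drop_eq_nil_of_le (by simp)]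
  simp [togN]

theorem count_take_succ (a : List Int) (j k : Nat) (hk : k < a.length) (hj : j ≤ k) :
    ((a.take (k+1)).drop j).count (1:Int)
      = ((a.take k).drop j).count 1 + (if a[k] = 1 then 1 else 0) := by
  rw [List.take_add_one, List.getElem?_eq_getElem hk, Option.toList_some,
    List.drop_append_of_le_length (by simp [Nat.min_eq_left hk.le]; omega),
    List.count_append]
  simp [List.count_singleton]

theorem count_take_zero_of_ge (a : List Int) (j k : Nat) (hj : k ≤ j) :
    ((a.take k).drop j).count (1:Int) = 0 := by
  rw [List.drop_eq_nil_of_le (by simp; omega)]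
  rfl

theorem Fk_succ_of_ne (a : List Int) (k : Nat) (hk : k < a.length) (h1 : a[k] ≠ 1) :
    Fk (k+1) a = Fk k a := by
  apply List.ext_getElem (by simp [length_Fk])
  intro j hj _
  rw [getElem_Fk, getElem_Fk]
  · by_cases hjk : j ≤ k
    · rw [count_take_succ a j k hk hjk, if_neg h1, Nat.add_zero]
    · rw [count_take_zero_of_ge a j (k+1) (by omega), count_take_zero_of_ge a j k (by omega)]
  all_goals rw [length_Fk] at hj; exact hj

theorem getElem_togPre (m : Nat) (s : List Int) (hm : m ≤ s.length) (j : Nat) (hj : j < s.length) :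
    (togPre m s)[j]'(by unfold togPre; simp; omega) = if j < m then tog s[j] else s[j] := by
  unfold togPre
  rcases Nat.lt_or_ge j m with h | h
  · rw [List.getElem_append_left (by simp; omega)]
    simp [List.getElem_take, h]
  · rw [List.getElem_append_right (by simp; omega)]
    simp only [List.length_map, List.length_take, Nat.min_eq_left hm]
    rw [List.getElem_drop, if_neg (by omega)]
    congr 1
    omega

theorem Fk_succ_of_eq (a : List Int) (k : Nat) (hk : k < a.length) (h1 : a[k] = 1) :
    Fk (k+1) a = togPre (k+1) (Fk k a) := by
  apply List.ext_getElem (by unfold togPre; simp [length_Fk]; omega)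
  intro j hj hj2
  have hja : j < a.length := by rw [length_Fk] at hj; exact hj
  rw [getElem_Fk _ _ _ hja,
    getElem_togPre (k+1) (Fk k a) (by rw [length_Fk]; omega) j (by rw [length_Fk]; exact hja)]
  by_cases hjk : j ≤ k
  · rw [if_pos (by omega), getElem_Fk k a j hja,
      count_take_succ a j k hk hjk, if_pos h1, togN, togN, Function.iterate_succ_apply']
  · rw [if_neg (by omega), getElem_Fk k a j hja,
      count_take_zero_of_ge a j (k+1) (by omega), count_take_zero_of_ge a j k (by omega)]

theorem outer_eq_Fk (a : List Int) (k : Nat) (hk : k ≤ a.length) :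
    (PySem.List.pyRange 0 (k : Int) 1).foldl
      (fun s i =>
        if PySem.List.pyGetD s i 0 = 1 then
          (PySem.List.pyRange 0 (i + 1) 1).foldl
            (fun t j =>
              if PySem.List.pyGetD t j 0 = 1 then PySem.List.pySetD t j 0
              else PySem.List.pySetD t j 1) s
        else s) a = Fk k a := by
  induction k with
  | zero =>
    rw [Fk_zero]
    simp [PySem.List.pyRange_one_eq_nil]
  | succ k ih =>
    rw [show ((k+1:Nat):Int) = (k:Int)+1 by push_cast; ring,
      PySem.List.pyRange_one_succ_right (by positivity), List.foldl_append,
      ih (by omega)]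
    have hklen : k < a.length := hk
    simp only [List.foldl_cons, List.foldl_nil]
    rw [PySem.List.pyGetD_natCast, getD_Fk_self k a hklen]
    by_cases h1 : a[k] = 1
    · rw [if_pos h1, show ((k:Int)+1) = ((k+1:Nat):Int) by push_cast; ring,
        inner_eq_togPre (k+1) (Fk k a) (by rw [length_Fk]; omega),
        ← Fk_succ_of_eq a k hklen h1]
    · rw [if_neg h1, Fk_succ_of_ne a k hklen h1]

-- ===== VERDICT (by name: the statement is the Claim_ definition above) =====
theorem solution_spec : Claim_equal_solution := by
  intro a _
  show solution a = solution_alt a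
  rw [solution, outer_eq_Fk a a.length le_rfl, alt_eq_specF, specF_eq_Fn]
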